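-- pv_equiv track=rewrite | github.com/dlstadther/advent_of_code_2022 | solutions/01.py | get_aggregate_calories_desc
-- ===== SOURCE A (Python) =====
-- from typing import List
--
-- def get_aggregate_calories_desc(input: List[str]) -> List[int]:
--     calories = list()
--     calorie_counter = 0
--     for line in input:
--         if not line:
--             calories.append(calorie_counter)
--             calorie_counter = 0
--             continue
--         calorie_counter += int(line)
--     calories_desc = sorted(calories, reverse=True)
--     return calories_desc
-- ===== SOURCE B (Python) =====
-- from typing import List
--
-- def get_aggregate_calories_desc(input: List[str]) -> List[int]:
--     # parse once: blank lines stay as the separator sentinel '', the rest become ints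
--     rest = [line if not line else int(line) for line in input]
--     sums = []
--     while '' in rest:
--         i = rest.index('')
--         sums.append(sum(rest[:i]))
--         rest = rest[i + 1:]
--     return sorted(sums, reverse=True)
-- ===== Notes on version B (the rewrite author's own statement) =====
-- stated objective: alternative
-- what changed: B replaces A's single accumulating pass with carried counter state by an index-and-slice decomposition: repeatedly locate the next blank line with .index(''), sum the slice before it, and drop the processed prefix; trailing lines without a closing blank are naturally never summed.
import Mathlib
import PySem

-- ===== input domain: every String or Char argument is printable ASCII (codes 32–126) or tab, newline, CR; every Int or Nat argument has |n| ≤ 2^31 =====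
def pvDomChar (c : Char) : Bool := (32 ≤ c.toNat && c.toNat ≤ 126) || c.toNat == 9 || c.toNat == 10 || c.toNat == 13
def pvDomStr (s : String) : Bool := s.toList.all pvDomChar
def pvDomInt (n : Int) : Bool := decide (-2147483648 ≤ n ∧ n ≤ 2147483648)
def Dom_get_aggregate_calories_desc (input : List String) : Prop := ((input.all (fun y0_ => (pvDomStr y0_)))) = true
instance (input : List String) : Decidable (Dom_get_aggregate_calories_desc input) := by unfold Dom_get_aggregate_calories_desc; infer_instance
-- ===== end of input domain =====

-- B is an alternative decomposition (find-next-blank index + slice sums) of A's accumulating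
-- pass; equivalence of the two is proved on inputs where every nonempty line parses as an int.

-- int(line); under Pre_ every parsed line is some, the default is never used
def pvInt (s : String) : Int := (PySem.Int.ofStr? s).getD 0

-- ===== PORT A =====
-- the loop body of A: append the counter at a blank line, otherwise accumulate
def stepA (st : List Int × Int) (line : String) : List Int × Int :=
  if line = "" then (st.1 ++ [st.2], 0) else (st.1, st.2 + pvInt line)

def get_aggregate_calories_desc (input : List String) : List Int :=
  let st := input.foldl stepA ([], 0)
  PySem.List.sorted st.1 (fun x => x) true

-- ===== PORT B =====
-- B's mixed list [line if not line else int(line)]: the sentinel '' is ported as none, an int as some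
def parseLine (l : String) : Option Int := if l = "" then none else some (pvInt l)

-- the while loop of B: while '' in rest: i = rest.index(''); emit sum(rest[:i]); rest = rest[i+1:]
-- (every element of rest[:i] is an int, i.e. some; summing via filterMap id is exact there)
def altGroups (rest : List (Option Int)) : List Int :=
  match h : PySem.List.index? rest none with
  | none => []
  | some i =>
      (((rest.take i).filterMap id).sum) :: altGroups (rest.drop (i + 1))
termination_by rest.length
decreasing_by
  have hk := PySem.List.getElem_of_index?_eq_some h
  obtain ⟨hlt, -, -⟩ := hk
  simp
  omega

def get_aggregate_calories_desc_alt (input : List String) : List Int :=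
  PySem.List.sorted (altGroups (input.map parseLine)) (fun x => x) true

-- ===== PRECONDITION & SPEC =====
-- A calls int(line) on every nonempty line and raises ValueError on unparsable ones; Pre_ admits exactly the inputs where A returns
def Pre_get_aggregate_calories_desc (input : List String) : Prop :=
  ∀ l ∈ input, l ≠ "" → (PySem.Int.ofStr? l).isSome = true
instance (input : List String) : Decidable (Pre_get_aggregate_calories_desc input) := by
  unfold Pre_get_aggregate_calories_desc; infer_instance

def pvWitness_get_aggregate_calories_desc : List String :=
  ["1000", "2000", "", "3000", "", "400"]

def Spec_get_aggregate_calories_desc (input : List String) (out : List Int) : Prop :=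
  out = get_aggregate_calories_desc_alt input
instance (input : List String) (out : List Int) : Decidable (Spec_get_aggregate_calories_desc input out) := by
  unfold Spec_get_aggregate_calories_desc; infer_instance

-- ===== CLAIM (what is proved, stated in full; the proofs are below) =====
def Claim_equal_get_aggregate_calories_desc : Prop :=
  ∀ (input : List String), Dom_get_aggregate_calories_desc input →
    Pre_get_aggregate_calories_desc input →
    Spec_get_aggregate_calories_desc input (get_aggregate_calories_desc input)

-- ===== LEMMAS AND PROOFS =====

-- A's group list written as a structural recursion carrying the counter
def sumsAux : Int → List String → List Int
  | _, [] => []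
  | c, l :: rest => if l = "" then c :: sumsAux 0 rest else sumsAux (c + pvInt l) rest

theorem foldl_stepA (input : List String) :
    ∀ (cal : List Int) (c : Int),
      (input.foldl stepA (cal, c)).1 = cal ++ sumsAux c input := by
  induction input with
  | nil => intro cal c; simp [sumsAux]
  | cons l rest ih =>
      intro cal c
      by_cases hl : l = ""
      · simp [stepA, hl, sumsAux, ih]
      · simp [stepA, hl, sumsAux, ih]

theorem sumsAux_index (input : List String) :
    ∀ (c : Int),
      sumsAux c input =
        match PySem.List.index? (input.map parseLine) none with
        | none => []
        | some i =>
            (c + (((input.map parseLine).take i).filterMap id).sum) ::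
              sumsAux 0 (input.drop (i + 1)) := by
  induction input with
  | nil => intro c; simp [sumsAux, PySem.List.index?]
  | cons l rest ih =>
      intro c
      by_cases hl : l = ""
      · subst hl
        simp only [List.map_cons, show parseLine "" = none from rfl]
        rw [PySem.List.index?_cons_self]
        simp [sumsAux]
      · simp only [List.map_cons, show parseLine l = some (pvInt l) from by simp [parseLine, hl]]
        rw [PySem.List.index?_cons_of_ne (rest.map parseLine) (by simp)]
        simp only [sumsAux, if_neg hl]
        rw [ih (c + pvInt l)]
        cases hidx : PySem.List.index? (rest.map parseLine) none with
        | none => simp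
        | some j =>
            simp only [Option.map_some, List.take_succ_cons, List.drop_succ_cons,
              List.filterMap_cons, id]
            simp
            ring

theorem altGroups_none {input : List (Option Int)} (h : PySem.List.index? input none = none) :
    altGroups input = [] := by
  rw [altGroups]; split
  · rfl
  · rename_i i heq; rw [h] at heq; cases heq

theorem altGroups_some {input : List (Option Int)} {i : Nat}
    (h : PySem.List.index? input none = some i) :
    altGroups input = (((input.take i).filterMap id).sum) :: altGroups (input.drop (i + 1)) := by
  rw [altGroups]; split
  · rename_i heq; rw [h] at heq; cases heq
  · rename_i j heq
    rw [h] at heq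
    obtain rfl : i = j := by injection heq
    rfl

theorem altGroups_eq_sumsAux (input : List String) :
    altGroups (input.map parseLine) = sumsAux 0 input := by
  induction hn : input.length using Nat.strong_induction_on generalizing input with
  | _ n ih =>
      rw [sumsAux_index]
      cases h : PySem.List.index? (input.map parseLine) none with
      | none => simp [altGroups_none h]
      | some i =>
          obtain ⟨hlt, -, -⟩ := PySem.List.getElem_of_index?_eq_some h
          rw [altGroups_some h]
          rw [show (input.map parseLine).drop (i + 1) = (input.drop (i + 1)).map parseLine by
            simp [List.map_drop]]
          rw [ih ((input.drop (i + 1)).length) (by simp at hlt ⊢; omega) _ rfl]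
          simp

-- ===== VERDICT (by name: the statement is the Claim_ definition above) =====
theorem get_aggregate_calories_desc_spec : Claim_equal_get_aggregate_calories_desc := by
  intro input _ _
  unfold Spec_get_aggregate_calories_desc get_aggregate_calories_desc get_aggregate_calories_desc_alt
  rw [altGroups_eq_sumsAux]
  show PySem.List.sorted (input.foldl stepA ([], 0)).1 (fun x => x) true = _
  rw [foldl_stepA]
  simp
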